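-- pv_equiv track=rewrite | github.com/trinkner/yearbirder | src/code_Graphs.py | _build_cumulative_locations_data
-- ===== SOURCE A (Python) =====
-- from collections import defaultdict
--
-- def _build_cumulative_locations_data(sightings):
--     """Return (dates, counts, new_locations, y_label).
--
--     new_locations[i] is a sorted list of location names first seen on dates[i].
--     """
--     daily = defaultdict(set)
--     for s in sightings:
--         daily[s["date"]].add(s["location"])
--     dates = sorted(daily.keys())
--     seen = set()
--     counts = []
--     new_locations = []
--     for d in dates:
--         new_locs = sorted(daily[d] - seen)
--         seen |= daily[d]
--         counts.append(len(seen))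
--         new_locations.append(new_locs)
--     return dates, counts, new_locations, "Cumulative Locations"
-- ===== SOURCE B (Python) =====
-- def _build_cumulative_locations_data(sightings):
--     """Return (dates, counts, new_locations, y_label).
--
--     Different decomposition: one pass computes each location's first (minimum)
--     date and the set of all dates; locations are bucketed by first date and a
--     running total replaces the growing 'seen' set.
--     """
--     first_seen = {}
--     all_dates = set()
--     for s in sightings:
--         d = s["date"]
--         loc = s["location"]
--         all_dates.add(d)
--         if loc not in first_seen or d < first_seen[loc]:
--             first_seen[loc] = d
--     by_date = {}
--     for loc, d in first_seen.items():
--         by_date.setdefault(d, []).append(loc)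
--     dates = sorted(all_dates)
--     counts = []
--     new_locations = []
--     total = 0
--     for d in dates:
--         new_locs = sorted(by_date.get(d, []))
--         total += len(new_locs)
--         counts.append(total)
--         new_locations.append(new_locs)
--     return dates, counts, new_locations, "Cumulative Locations"
-- ===== Notes on version B (the rewrite author's own statement) =====
-- stated objective: alternative
-- what changed: Instead of iterating sorted dates while growing a 'seen' set and subtracting it from each day's set, B computes in one pass each location's minimum (first) date plus the set of all dates, buckets locations by first date, and emits counts with a running integer total.
import Mathlib
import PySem

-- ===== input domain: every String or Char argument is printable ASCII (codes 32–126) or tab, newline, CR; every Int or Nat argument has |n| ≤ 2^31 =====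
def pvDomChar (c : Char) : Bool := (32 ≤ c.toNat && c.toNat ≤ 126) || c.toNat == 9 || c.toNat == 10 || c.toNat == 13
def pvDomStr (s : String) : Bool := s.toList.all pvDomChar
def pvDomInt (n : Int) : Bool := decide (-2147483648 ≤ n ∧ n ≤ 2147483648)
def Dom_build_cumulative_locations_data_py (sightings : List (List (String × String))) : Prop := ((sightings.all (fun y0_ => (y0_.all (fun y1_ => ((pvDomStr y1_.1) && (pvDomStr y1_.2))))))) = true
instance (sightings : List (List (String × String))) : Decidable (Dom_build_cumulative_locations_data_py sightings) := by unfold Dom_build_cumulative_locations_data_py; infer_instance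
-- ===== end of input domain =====

-- B replaces A's grow-a-seen-set-and-subtract loop by a one-pass minimum-first-date map,
-- buckets locations by first date and keeps a running integer total (objective: alternative).


-- s[k] on the dict s (association list, first match); total under Pre_ (key present)
def pvKey (s : List (String × String)) (k : String) : String :=
  (PySem.Dict.mk s).getD k ""

-- ===== PORT A =====
-- daily = defaultdict(set); for s in sightings: daily[s["date"]].add(s["location"])
def pvDailyA (sightings : List (List (String × String))) : PySem.Dict String (PySem.Set String) :=
  sightings.foldl
    (fun d s => d.modify (pvKey s "date") [] (fun st => st.add (pvKey s "location")))
    PySem.Dict.empty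

-- body of "for d in dates": new_locs = sorted(daily[d] - seen); seen |= daily[d]; append len(seen), new_locs
def pvStepA (daily : PySem.Dict String (PySem.Set String))
    (acc : PySem.Set String × List Int × List (List String)) (d : String) :
    PySem.Set String × List Int × List (List String) :=
  let newLocs := PySem.List.sorted (PySem.Set.diff (daily.getD d []) acc.1) (fun x => x)
  let seen := acc.1.union (daily.getD d [])
  (seen, acc.2.1 ++ [PySem.Set.len seen], acc.2.2 ++ [newLocs])

def build_cumulative_locations_data_py (sightings : List (List (String × String))) :
    List String × List Int × List (List String) × String :=
  let daily := pvDailyA sightings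
  let dates := PySem.List.sorted daily.keys (fun x => x)
  let r := dates.foldl (pvStepA daily) (PySem.Set.empty, [], [])
  (dates, r.2.1, r.2.2, "Cumulative Locations")

-- ===== PORT B =====
-- if loc not in first_seen or d < first_seen[loc]: first_seen[loc] = d
def pvStepFS (fs : PySem.Dict String String) (s : List (String × String)) : PySem.Dict String String :=
  if !fs.contains (pvKey s "location") || decide (pvKey s "date" < fs.getD (pvKey s "location") "")
  then fs.insert (pvKey s "location") (pvKey s "date") else fs

-- all_dates.add(d)
def pvStepDates (st : PySem.Set String) (s : List (String × String)) : PySem.Set String :=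
  st.add (pvKey s "date")

-- by_date.setdefault(d, []).append(loc)
def pvBucket (fs : PySem.Dict String String) : PySem.Dict String (List String) :=
  fs.items.foldl (fun bd p => bd.modify p.2 [] (fun l => l ++ [p.1])) PySem.Dict.empty

-- body of "for d in dates": new_locs = sorted(by_date.get(d, [])); total += len(new_locs); append
def pvStepB (byDate : PySem.Dict String (List String))
    (acc : Int × List Int × List (List String)) (d : String) :
    Int × List Int × List (List String) :=
  let newLocs := PySem.List.sorted (byDate.getD d []) (fun x => x)
  (acc.1 + PySem.List.len newLocs, acc.2.1 ++ [acc.1 + PySem.List.len newLocs], acc.2.2 ++ [newLocs])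

def build_cumulative_locations_data_py_alt (sightings : List (List (String × String))) :
    List String × List Int × List (List String) × String :=
  let p := sightings.foldl (fun acc s => (pvStepFS acc.1 s, pvStepDates acc.2 s))
    (PySem.Dict.empty, PySem.Set.empty)
  let byDate := pvBucket p.1
  let dates := PySem.List.sorted p.2 (fun x => x)
  let r := dates.foldl (pvStepB byDate) (0, [], [])
  (dates, r.2.1, r.2.2, "Cumulative Locations")

-- ===== PRECONDITION & SPEC =====
-- Pre_ excludes exactly the sightings whose dict lacks a "date" or "location" key: there Python A raises KeyError.
def Pre_build_cumulative_locations_data_py (sightings : List (List (String × String))) : Prop :=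
  ∀ s ∈ sightings, "date" ∈ s.map Prod.fst ∧ "location" ∈ s.map Prod.fst
instance (sightings : List (List (String × String))) : Decidable (Pre_build_cumulative_locations_data_py sightings) := by unfold Pre_build_cumulative_locations_data_py; infer_instance

def pvWitness_build_cumulative_locations_data_py : (List (List (String × String))) :=
  [[("date", "2021-01-01"), ("location", "Park")], [("date", "2021-01-02"), ("location", "Lake")]]

def Spec_build_cumulative_locations_data_py (sightings : List (List (String × String))) (out : List String × List Int × List (List String) × String) : Prop := out = build_cumulative_locations_data_py_alt sightings
instance (sightings : List (List (String × String))) (out : List String × List Int × List (List String) × String) : Decidable (Spec_build_cumulative_locations_data_py sightings out) := by unfold Spec_build_cumulative_locations_data_py; infer_instance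

-- ===== CLAIM (what is proved, stated in full; the proofs are below) =====
def Claim_equal_build_cumulative_locations_data_py : Prop := ∀ (sightings : List (List (String × String))), Dom_build_cumulative_locations_data_py sightings → Pre_build_cumulative_locations_data_py sightings → Spec_build_cumulative_locations_data_py sightings (build_cumulative_locations_data_py sightings)

-- ===== LEMMAS AND PROOFS =====

-- abbreviations for the two fields of a sighting
def pvD (s : List (String × String)) : String := pvKey s "date"
def pvL (s : List (String × String)) : String := pvKey s "location"

-- A's daily[d], resolved: the set of locations of the sightings dated d
lemma pvDailyA_getD (l : List (List (String × String))) (dd : PySem.Dict String (PySem.Set String)) (d : String) :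
    (l.foldl (fun d s => d.modify (pvKey s "date") [] (fun st => st.add (pvKey s "location"))) dd).getD d []
    = (l.filter (fun s => pvD s == d)).foldl (fun st s => st.add (pvL s)) (dd.getD d []) := by
  induction l generalizing dd with
  | nil => rfl
  | cons s t ih =>
    rw [List.foldl_cons, ih, List.filter_cons]
    by_cases h : pvD s = d
    · have hk : pvKey s "date" = d := h
      simp [h, hk, pvL]
    · have hk : ¬ d = pvKey s "date" := fun hc => h hc.symm
      simp [h, PySem.Dict.getD_modify, hk]

lemma pvDailyA_at (sg : List (List (String × String))) (d : String) :
    (pvDailyA sg).getD d [] = PySem.Set.ofList (((sg.filter (fun s => pvD s == d)).map pvL)) := by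
  rw [pvDailyA, pvDailyA_getD, PySem.Set.ofList_eq_foldl, List.foldl_map]
  rfl

lemma mem_pvDailyA (sg : List (List (String × String))) (d x : String) :
    x ∈ (pvDailyA sg).getD d [] ↔ ∃ s ∈ sg, pvD s = d ∧ pvL s = x := by
  rw [pvDailyA_at, PySem.Set.mem_ofList]
  simp only [List.mem_map, List.mem_filter, beq_iff_eq]
  constructor
  · rintro ⟨s, ⟨hs, hd⟩, hl⟩; exact ⟨s, hs, hd, hl⟩
  · rintro ⟨s, hs, hd, hl⟩; exact ⟨s, ⟨hs, hd⟩, hl⟩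

lemma nodup_pvDailyA (sg : List (List (String × String))) (d : String) :
    ((pvDailyA sg).getD d []).Nodup := by
  rw [pvDailyA_at]; exact PySem.Set.nodup_ofList _

-- first_seen of B, resolved pointwise: a running minimum over the dates of x's sightings
def pvOmin (o : Option String) (d : String) : Option String :=
  some (o.elim d (fun m => min m d))

lemma pvFS_get? (l : List (List (String × String))) (fs0 : PySem.Dict String String) (x : String) :
    (l.foldl pvStepFS fs0).get? x
    = ((l.filter (fun s => pvL s == x)).map pvD).foldl pvOmin (fs0.get? x) := by
  induction l generalizing fs0 with
  | nil => rfl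
  | cons s t ih =>
    rw [List.foldl_cons, ih, List.filter_cons]
    by_cases h : pvL s = x
    · have hk : pvKey s "location" = x := h
      simp only [h, beq_self_eq_true, if_pos, List.map_cons, List.foldl_cons]
      congr 1
      rw [pvStepFS]
      cases hc : fs0.get? x with
      | none =>
        have hcon : fs0.contains (pvKey s "location") = false := by
          rw [hk, PySem.Dict.contains_eq_isSome_get?, hc]; rfl
        rw [if_pos (by simp [hcon])]
        rw [hk, PySem.Dict.get?_insert_self]
        rfl
      | some m =>
        have hcon : fs0.contains (pvKey s "location") = true := by
          rw [hk, PySem.Dict.contains_eq_isSome_get?, hc]; rfl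
        have hgd : fs0.getD (pvKey s "location") "" = m := by
          rw [hk, PySem.Dict.getD_eq_get?_getD, hc]; rfl
        by_cases hlt : pvKey s "date" < m
        · rw [if_pos (by simp [hcon, hgd, hlt]), hk, PySem.Dict.get?_insert_self]
          show some (pvKey s "date") = some (min m (pvKey s "date"))
          rw [min_eq_right (le_of_lt hlt)]
        · rw [if_neg (by simp [hcon, hgd, hlt]), hc]
          show some m = some (min m (pvKey s "date"))
          rw [min_eq_left (not_lt.mp hlt)]
    · have hstep : (pvStepFS fs0 s).get? x = fs0.get? x := by
        rw [pvStepFS]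
        split
        · exact PySem.Dict.get?_insert_of_ne _ _ (fun hc => h hc.symm)
        · rfl
      simp [h, hstep]

lemma foldl_pvOmin_some (t : List String) (a : String) :
    t.foldl pvOmin (some a) = some (t.foldl min a) := by
  induction t generalizing a with
  | nil => rfl
  | cons d t ih => rw [List.foldl_cons, List.foldl_cons]; exact ih (min a d)

lemma nodup_keys_pvFS (l : List (List (String × String))) (fs0 : PySem.Dict String String)
    (h : fs0.keys.Nodup) : (l.foldl pvStepFS fs0).keys.Nodup := by
  induction l generalizing fs0 with
  | nil => exact h
  | cons s t ih =>
    rw [List.foldl_cons]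
    apply ih
    rw [pvStepFS]
    split
    · exact PySem.Dict.nodup_keys_insert _ _ _ h
    · exact h

-- the dates at which location x was sighted
lemma mem_datesOf (sg : List (List (String × String))) (x y : String) :
    y ∈ (sg.filter (fun s => pvL s == x)).map pvD ↔ ∃ s ∈ sg, pvL s = x ∧ pvD s = y := by
  simp only [List.mem_map, List.mem_filter, beq_iff_eq]
  constructor
  · rintro ⟨s, ⟨hs, hl⟩, hd⟩; exact ⟨s, hs, hl, hd⟩
  · rintro ⟨s, hs, hl, hd⟩; exact ⟨s, ⟨hs, hl⟩, hd⟩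

-- fs.get? x = some m → m is a date of x and a lower bound of x's dates
lemma pvFS_min (sg : List (List (String × String))) (x m : String)
    (h : (sg.foldl pvStepFS PySem.Dict.empty).get? x = some m) :
    (∃ s ∈ sg, pvL s = x ∧ pvD s = m) ∧ ∀ s ∈ sg, pvL s = x → m ≤ pvD s := by
  rw [pvFS_get?, PySem.Dict.get?_empty] at h
  cases ht : (sg.filter (fun s => pvL s == x)).map pvD with
  | nil => rw [ht] at h; simp at h
  | cons d ds =>
    rw [ht, List.foldl_cons] at h
    have h0 : pvOmin none d = some d := rfl
    rw [h0, foldl_pvOmin_some] at h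
    have hm : m = ds.foldl min d := (Option.some.inj h).symm
    have hlb := PySem.List.foldl_min_le ds d
    have hmem := PySem.List.foldl_min_mem ds d
    constructor
    · have : m ∈ d :: ds := by
        rcases hmem with he | he
        · rw [hm, he]; exact List.mem_cons_self
        · rw [hm]; exact List.mem_cons_of_mem _ he
      rw [← ht] at this
      exact (mem_datesOf sg x m).mp this
    · intro s hs hl
      have : pvD s ∈ d :: ds := by
        rw [← ht]; exact (mem_datesOf sg x (pvD s)).mpr ⟨s, hs, hl, rfl⟩
      rcases List.mem_cons.mp this with he | he
      · rw [hm, he]; exact hlb.1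
      · rw [hm]; exact hlb.2 _ he

lemma pvFS_isSome (sg : List (List (String × String))) (x : String)
    (h : ∃ s ∈ sg, pvL s = x) :
    ((sg.foldl pvStepFS PySem.Dict.empty).get? x).isSome := by
  rw [pvFS_get?, PySem.Dict.get?_empty]
  obtain ⟨s, hs, hl⟩ := h
  cases ht : (sg.filter (fun s => pvL s == x)).map pvD with
  | nil =>
    exfalso
    have : pvD s ∈ (sg.filter (fun s => pvL s == x)).map pvD :=
      (mem_datesOf sg x (pvD s)).mpr ⟨s, hs, hl, rfl⟩
    rw [ht] at this; exact (List.not_mem_nil) this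
  | cons d ds =>
    rw [List.foldl_cons]
    have h0 : pvOmin none d = some d := rfl
    rw [h0, foldl_pvOmin_some]
    rfl

-- B's by_date.get(d, []), resolved: the keys of first_seen whose value is d
lemma pvBucket_getD (fs : PySem.Dict String String) (d : String) :
    (pvBucket fs).getD d [] = (fs.items.filter (fun p => p.2 == d)).map (fun p => p.1) := by
  rw [pvBucket]
  have heq : fs.items.foldl (fun bd p => bd.modify p.2 [] (fun l => l ++ [p.1])) PySem.Dict.empty
      = (fs.items.map Prod.swap).foldl (fun bd p => bd.modify p.1 [] (fun l => l ++ [p.2])) PySem.Dict.empty := by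
    rw [List.foldl_map]
    rfl
  rw [heq, PySem.Dict.getD_foldl_modify_append]
  simp [List.filter_map, List.map_map, Function.comp_def, Prod.swap]

lemma mem_pvBucket (fs : PySem.Dict String String) (hnd : fs.keys.Nodup) (d x : String) :
    x ∈ (pvBucket fs).getD d [] ↔ fs.get? x = some d := by
  rw [pvBucket_getD]
  simp only [List.mem_map, List.mem_filter, beq_iff_eq]
  constructor
  · rintro ⟨⟨a, b⟩, ⟨hp, h2⟩, h1⟩
    cases h1; cases h2
    exact PySem.Dict.get?_of_mem_items fs hp hnd
  · intro h
    exact ⟨(x, d), ⟨PySem.Dict.mem_items_of_get?_eq_some fs h, rfl⟩, rfl⟩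

lemma nodup_pvBucket (fs : PySem.Dict String String) (hnd : fs.keys.Nodup) (d : String) :
    ((pvBucket fs).getD d []).Nodup := by
  rw [pvBucket_getD]
  have hsub : ((fs.items.filter (fun p => p.2 == d)).map (fun p => p.1)).Sublist
      (fs.items.map (fun p => p.1)) := List.Sublist.map _ List.filter_sublist
  exact hnd.sublist hsub

-- two nodup lists with the same members sort to the same list
lemma sorted_eq_of_mem (xs ys : List String) (hx : xs.Nodup) (hy : ys.Nodup)
    (h : ∀ a, a ∈ xs ↔ a ∈ ys) :
    PySem.List.sorted xs (fun x => x) = PySem.List.sorted ys (fun x => x) := by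
  have hperm : ys.Perm xs := by
    rw [List.perm_ext_iff_of_nodup hy hx]; intro a; exact (h a).symm
  have hsp := PySem.List.sorted_perm ys (fun x => x) false
  have h1 : (PySem.List.sorted ys (fun x => x)).Perm xs := hsp.trans hperm
  have hnd : (PySem.List.sorted ys (fun x => x)).Nodup := hsp.nodup_iff.mpr hy
  have h2 : (PySem.List.sorted ys (fun x => x)).Pairwise (fun a b => a < b) := by
    have hle := PySem.List.sorted_pairwise ys (fun x => x)
    exact (hle.and hnd).imp (fun hab => lt_of_le_of_ne hab.1 hab.2)
  exact PySem.List.sorted_eq_of_perm_of_pairwise_lt xs _ _ h1 h2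

-- the central step fact: on a date d still to come, "today's set minus seen" is exactly B's bucket
lemma diff_eq_bucket (sg : List (List (String × String))) (P L : List String) (d : String)
    (S : PySem.Set String)
    (hPL : (P ++ d :: L).Pairwise (· < ·))
    (hcover : ∀ s ∈ sg, pvD s ∈ P ++ d :: L)
    (hSmem : ∀ x, x ∈ S ↔ ∃ d' ∈ P, ∃ s ∈ sg, pvD s = d' ∧ pvL s = x)
    (x : String) :
    x ∈ PySem.Set.diff ((pvDailyA sg).getD d []) S
    ↔ x ∈ (pvBucket (sg.foldl pvStepFS PySem.Dict.empty)).getD d [] := by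
  have hndk : (sg.foldl pvStepFS PySem.Dict.empty).keys.Nodup :=
    nodup_keys_pvFS sg PySem.Dict.empty PySem.Dict.nodup_keys_empty
  rw [PySem.Set.mem_diff, mem_pvDailyA, mem_pvBucket _ hndk]
  have hPd : ∀ d' ∈ P, d' < d := by
    intro d' hd'
    exact (List.pairwise_append.mp hPL).2.2 d' hd' d (List.mem_cons_self)
  have hdL : ∀ m ∈ L, d < m :=
    (List.pairwise_cons.mp (List.pairwise_append.mp hPL).2.1).1
  constructor
  · rintro ⟨⟨s0, hs0, hd0, hl0⟩, hxS⟩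
    have hsome := pvFS_isSome sg x ⟨s0, hs0, hl0⟩
    obtain ⟨m, hm⟩ := Option.isSome_iff_exists.mp hsome
    obtain ⟨⟨s1, hs1, hl1, hd1⟩, hlb⟩ := pvFS_min sg x m hm
    have hmd : m ≤ d := by rw [← hd0]; exact hlb s0 hs0 hl0
    have hmP : m ∉ P := by
      intro hmP
      exact hxS ((hSmem x).mpr ⟨m, hmP, s1, hs1, hd1, hl1⟩)
    have hmem := hcover s1 hs1
    rw [hd1] at hmem
    rcases List.mem_append.mp hmem with hP | hdl
    · exact absurd hP hmP
    · rcases List.mem_cons.mp hdl with he | hL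
      · rw [← he]; exact hm
      · exact absurd hmd (not_le.mpr (hdL m hL))
  · intro h
    obtain ⟨⟨s1, hs1, hl1, hd1⟩, hlb⟩ := pvFS_min sg x d h
    refine ⟨⟨s1, hs1, hd1, hl1⟩, ?_⟩
    intro hxS
    obtain ⟨d', hd'P, s2, hs2, hd2, hl2⟩ := (hSmem x).mp hxS
    have : d ≤ d' := by rw [← hd2]; exact hlb s2 hs2 hl2
    exact absurd this (not_le.mpr (hPd d' hd'P))

-- the main loop invariant
lemma loop_eq (sg : List (List (String × String))) (L P : List String)
    (S : PySem.Set String) (cs : List Int) (ns : List (List String))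
    (hPL : (P ++ L).Pairwise (· < ·))
    (hcover : ∀ s ∈ sg, pvD s ∈ P ++ L)
    (hSn : S.Nodup)
    (hSmem : ∀ x, x ∈ S ↔ ∃ d' ∈ P, ∃ s ∈ sg, pvD s = d' ∧ pvL s = x) :
    (L.foldl (pvStepA (pvDailyA sg)) (S, cs, ns)).2
    = (L.foldl (pvStepB (pvBucket (sg.foldl pvStepFS PySem.Dict.empty))) ((S.length : Int), cs, ns)).2 := by
  induction L generalizing P S cs ns with
  | nil => rfl
  | cons d L' ih =>
    rw [List.foldl_cons, List.foldl_cons]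
    have hT : (pvDailyA sg).getD d [] = (pvDailyA sg).getD d [] := rfl
    set T := (pvDailyA sg).getD d [] with hTdef
    have hndT : T.Nodup := nodup_pvDailyA sg d
    have hndk : (sg.foldl pvStepFS PySem.Dict.empty).keys.Nodup :=
      nodup_keys_pvFS sg PySem.Dict.empty PySem.Dict.nodup_keys_empty
    have hmem := diff_eq_bucket sg P L' d S hPL hcover hSmem
    have hndD : (PySem.Set.diff T S).Nodup := PySem.Set.nodup_diff _ _ hndT
    have hndB : ((pvBucket (sg.foldl pvStepFS PySem.Dict.empty)).getD d []).Nodup :=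
      nodup_pvBucket _ hndk d
    have hsorteq : PySem.List.sorted (PySem.Set.diff T S) (fun x => x)
        = PySem.List.sorted ((pvBucket (sg.foldl pvStepFS PySem.Dict.empty)).getD d []) (fun x => x) :=
      sorted_eq_of_mem _ _ hndD hndB hmem
    have hunion : S.union T = S ++ PySem.Set.diff T S := by
      show PySem.Set.update S T = _
      rw [PySem.Set.update_eq_append_filter, PySem.Set.ofList_eq_self_of_nodup T hndT]
      rfl
    have hlen1 : (PySem.List.sorted (PySem.Set.diff T S) (fun x => x)).length
        = (PySem.Set.diff T S).length := (PySem.List.sorted_perm _ _ false).length_eq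
    have hlen2 : ((S.length : Int) + PySem.List.len (PySem.List.sorted (PySem.Set.diff T S) (fun x => x)))
        = ((S.union T).length : Int) := by
      rw [hunion, PySem.List.len_eq, hlen1, List.length_append]
      push_cast
      ring
    have hA : pvStepA (pvDailyA sg) (S, cs, ns) d
        = (S.union T, cs ++ [((S.union T).length : Int)], ns ++ [PySem.List.sorted (PySem.Set.diff T S) (fun x => x)]) := rfl
    have hB : pvStepB (pvBucket (sg.foldl pvStepFS PySem.Dict.empty)) ((S.length : Int), cs, ns) d
        = (((S.union T).length : Int), cs ++ [((S.union T).length : Int)], ns ++ [PySem.List.sorted (PySem.Set.diff T S) (fun x => x)]) := by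
      show ((S.length : Int) + PySem.List.len (PySem.List.sorted ((pvBucket (sg.foldl pvStepFS PySem.Dict.empty)).getD d []) (fun x => x)),
            cs ++ [(S.length : Int) + PySem.List.len (PySem.List.sorted ((pvBucket (sg.foldl pvStepFS PySem.Dict.empty)).getD d []) (fun x => x))],
            ns ++ [PySem.List.sorted ((pvBucket (sg.foldl pvStepFS PySem.Dict.empty)).getD d []) (fun x => x)]) = _
      rw [← hsorteq, hlen2]
    rw [hA, hB]
    have hPL' : ((P ++ [d]) ++ L').Pairwise (· < ·) := by
      rw [← List.append_cons]; exact hPL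
    have hcover' : ∀ s ∈ sg, pvD s ∈ (P ++ [d]) ++ L' := by
      intro s hs
      rw [← List.append_cons]
      exact hcover s hs
    have hSn' : (S.union T).Nodup := PySem.Set.nodup_union _ _ hSn
    have hSmem' : ∀ x, x ∈ S.union T ↔ ∃ d' ∈ P ++ [d], ∃ s ∈ sg, pvD s = d' ∧ pvL s = x := by
      intro x
      rw [PySem.Set.mem_union, hSmem x, hTdef, mem_pvDailyA]
      constructor
      · rintro (⟨d', hd', hrest⟩ | ⟨s, hs, hd, hl⟩)
        · exact ⟨d', List.mem_append_left _ hd', hrest⟩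
        · exact ⟨d, List.mem_append_right _ (List.mem_singleton.mpr rfl), s, hs, hd, hl⟩
      · rintro ⟨d', hd', s, hs, hd, hl⟩
        rcases List.mem_append.mp hd' with h1 | h1
        · exact Or.inl ⟨d', h1, s, hs, hd, hl⟩
        · right
          rw [List.mem_singleton] at h1
          subst h1
          exact ⟨s, hs, hd, hl⟩
    exact ih (P ++ [d]) (S.union T) _ _ hPL' hcover' hSn' hSmem'

-- ===== VERDICT (by name: the statement is the Claim_ definition above) =====
-- the two programs build the same sorted date list
lemma keys_pvDailyA (sg : List (List (String × String))) :
    (pvDailyA sg).keys = PySem.Set.ofList (sg.map (fun s => pvKey s "date")) := by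
  rw [pvDailyA,
    PySem.Dict.keys_foldl_modify_key sg (fun s => pvKey s "date") ([] : PySem.Set String)
      (fun _ s => fun st : PySem.Set String => st.add (pvKey s "location")) PySem.Dict.empty,
    PySem.Dict.keys_empty]
  exact PySem.Set.update_empty _

lemma foldl_pvStepDates (sg : List (List (String × String))) :
    List.foldl pvStepDates PySem.Set.empty sg = PySem.Set.ofList (sg.map (fun s => pvKey s "date")) := by
  have h1 := PySem.Set.update_map_eq_foldl_add sg (fun s => pvKey s "date") PySem.Set.empty
  rw [PySem.Set.update_empty] at h1
  exact h1.symm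

-- ===== VERDICT (by name: the statement is the Claim_ definition above) =====
theorem build_cumulative_locations_data_py_spec : Claim_equal_build_cumulative_locations_data_py := by
  unfold Claim_equal_build_cumulative_locations_data_py
  intro sg _ _
  unfold Spec_build_cumulative_locations_data_py
  simp only [build_cumulative_locations_data_py, build_cumulative_locations_data_py_alt]
  rw [PySem.List.foldl_prod_mk, keys_pvDailyA, foldl_pvStepDates]
  set dates := PySem.List.sorted (PySem.Set.ofList (sg.map (fun s => pvKey s "date"))) (fun x => x) with hdates
  have hperm := PySem.List.sorted_perm (PySem.Set.ofList (sg.map (fun s => pvKey s "date"))) (fun x : String => x) false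
  have hnd : dates.Nodup := hperm.nodup_iff.mpr (PySem.Set.nodup_ofList _)
  have hPL : (([] : List String) ++ dates).Pairwise (· < ·) := by
    rw [List.nil_append]
    have hle := PySem.List.sorted_pairwise (PySem.Set.ofList (sg.map (fun s => pvKey s "date"))) (fun x : String => x)
    exact (hle.and hnd).imp (fun hab => lt_of_le_of_ne hab.1 hab.2)
  have hcover : ∀ s ∈ sg, pvD s ∈ ([] : List String) ++ dates := by
    intro s hs
    rw [List.nil_append, hdates, hperm.mem_iff, PySem.Set.mem_ofList]
    exact List.mem_map.mpr ⟨s, hs, rfl⟩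
  have hSmem : ∀ x, x ∈ (PySem.Set.empty : PySem.Set String)
      ↔ ∃ d' ∈ ([] : List String), ∃ s ∈ sg, pvD s = d' ∧ pvL s = x := by
    simp [PySem.Set.empty]
  have hloop := loop_eq sg dates [] PySem.Set.empty [] [] hPL hcover List.nodup_nil hSmem
  have h1 := congrArg Prod.fst hloop
  have h2 := congrArg Prod.snd hloop
  simp only at h1 h2
  exact congrArg₂ (fun (a : List Int) (b : List (List String)) => (dates, a, b, "Cumulative Locations")) h1 h2
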